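-- pv_equiv track=rewrite | github.com/sbarczyk/WDI | Zestawy zadań/Zestaw 3/3.13.py | zad
-- ===== SOURCE A (Python) =====
-- def zad(t):
--     n = len(t)
--     max_length = 0
--     for left in range (n-1):
--         if n - left + 1< max_length:
--             break
--         for right in range (n-1, -1, -1):
--             if right - left + 1 < max_length:
--                 break
--             if t[left] == t[right]:
--                 cnt = 1
--                 left += 1
--                 right -= 1
--                 while right >= left:
--                     if t[right] == t[left]:
--                         cnt += 1
--                         left += 1
--                         right -= 1
--                     else:
--                         break
--                 max_length = max(cnt, max_length)
--     return max_length
-- ===== SOURCE B (Python) =====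
-- def zad(t):
--     n = len(t)
--     # g[(i, j)] = number of matching layers peeling inward from (i, j)
--     g = {}
--     for gap in range(n):
--         for i in range(n - gap):
--             if t[i] == t[i + gap]:
--                 g[(i, i + gap)] = 1 + g.get((i + 1, i + gap - 1), 0)
--     best = 0
--     for left in range(n - 1):
--         if n - left + 1 < best:
--             break
--         l = left
--         for right in range(n - 1, -1, -1):
--             if right - l + 1 < best:
--                 break
--             if t[l] == t[right]:
--                 cnt = 1 + g.get((l + 1, right - 1), 0)
--                 best = max(cnt, best)
--                 l += cnt
--     return best
-- ===== Notes on version B (the rewrite author's own statement) =====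
-- stated objective: alternative
-- what changed: A's inner while-loop that rescans t to count matching end-layers for each (left,right) pair is replaced by a table g[(i,j)] of inward match-lengths precomputed bottom-up by increasing gap, so the scan becomes a single O(1) table lookup per pair (A's persistent `left` across the inner loop is kept, as it determines the result).
import Mathlib
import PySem

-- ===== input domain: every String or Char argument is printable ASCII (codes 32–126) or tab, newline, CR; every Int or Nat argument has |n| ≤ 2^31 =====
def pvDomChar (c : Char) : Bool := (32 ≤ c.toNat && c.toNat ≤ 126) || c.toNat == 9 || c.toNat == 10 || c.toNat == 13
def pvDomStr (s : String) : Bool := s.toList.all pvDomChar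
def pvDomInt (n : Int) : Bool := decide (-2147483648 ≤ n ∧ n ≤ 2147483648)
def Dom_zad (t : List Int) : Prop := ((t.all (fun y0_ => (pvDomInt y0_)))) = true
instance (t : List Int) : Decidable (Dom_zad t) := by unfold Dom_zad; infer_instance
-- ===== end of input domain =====

-- B replaces A's inner while-scan by a table of inward match-lengths precomputed by gap
-- (alternative algorithm, same value on every input; A's `left` persisting across the inner
-- loop is part of the observed behaviour and is kept).

-- ===== PORT A =====
-- the `while right >= left: …` loop of A; returns (cnt, left, right) afterwards
def zadPeel (t : List Int) (l r cnt : Int) : Int × Int × Int :=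
  if _h : l ≤ r then
    if PySem.List.pyGetD t r 0 == PySem.List.pyGetD t l 0 then
      zadPeel t (l + 1) (r - 1) (cnt + 1)
    else (cnt, l, r)
  else (cnt, l, r)
termination_by (r - l + 1).toNat
decreasing_by omega

-- the `for right in range(n-1, -1, -1)` loop with its break; returns (max_length, left)
def zadInner (t : List Int) (M l : Int) (rs : List Int) : Int × Int :=
  match rs with
  | [] => (M, l)
  | r :: rest =>
    if r - l + 1 < M then (M, l)
    else if PySem.List.pyGetD t l 0 == PySem.List.pyGetD t r 0 then
      let p := zadPeel t (l + 1) (r - 1) 1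
      zadInner t (max p.1 M) p.2.1 rest
    else zadInner t M l rest

-- the `for left in range(n-1)` loop with its break
def zadOuter (t : List Int) (n M : Int) (ls : List Int) : Int :=
  match ls with
  | [] => M
  | L :: rest =>
    if n - L + 1 < M then M
    else zadOuter t n (zadInner t M L (PySem.List.pyRange (n - 1) (-1) (-1))).1 rest

def zad (t : List Int) : Int :=
  zadOuter t (t.length : Int) 0 (PySem.List.pyRange 0 ((t.length : Int) - 1) 1)

-- ===== PORT B =====
-- `for gap in range(n): for i in range(n-gap): …` building g[(i,i+gap)] = 1 + g.get((i+1,i+gap-1),0)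
def zadAltBuild (t : List Int) (n : Int) : PySem.Dict (Int × Int) Int :=
  (PySem.List.pyRange 0 n 1).foldl (fun g gap =>
    (PySem.List.pyRange 0 (n - gap) 1).foldl (fun g i =>
      if PySem.List.pyGetD t i 0 == PySem.List.pyGetD t (i + gap) 0 then
        g.insert (i, i + gap) (1 + g.getD (i + 1, i + gap - 1) 0)
      else g) g) PySem.Dict.empty

-- `for right in range(n-1, -1, -1)` with break; cnt comes from the table
def zadAltInner (t : List Int) (g : PySem.Dict (Int × Int) Int) (best l : Int)
    (rs : List Int) : Int × Int :=
  match rs with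
  | [] => (best, l)
  | r :: rest =>
    if r - l + 1 < best then (best, l)
    else if PySem.List.pyGetD t l 0 == PySem.List.pyGetD t r 0 then
      let cnt := 1 + g.getD (l + 1, r - 1) 0
      zadAltInner t g (max cnt best) (l + cnt) rest
    else zadAltInner t g best l rest

def zadAltOuter (t : List Int) (g : PySem.Dict (Int × Int) Int) (n best : Int)
    (ls : List Int) : Int :=
  match ls with
  | [] => best
  | L :: rest =>
    if n - L + 1 < best then best
    else zadAltOuter t g n
      (zadAltInner t g best L (PySem.List.pyRange (n - 1) (-1) (-1))).1 rest

def zad_alt (t : List Int) : Int :=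
  zadAltOuter t (zadAltBuild t (t.length : Int)) (t.length : Int) 0
    (PySem.List.pyRange 0 ((t.length : Int) - 1) 1)

-- ===== PRECONDITION & SPEC =====
def Spec_zad (t : List Int) (out : Int) : Prop := out = zad_alt t
instance (t : List Int) (out : Int) : Decidable (Spec_zad t out) := by unfold Spec_zad; infer_instance

-- ===== CLAIM (what is proved, stated in full; the proofs are below) =====
def Claim_equal_zad : Prop := ∀ (t : List Int), Dom_zad t → Spec_zad t (zad t)

-- ===== LEMMAS AND PROOFS =====

-- number of matching layers peeling inward from (l, r); the common spec of A's while and B's table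
def layers (t : List Int) (l r : Int) : Int :=
  if _h : l ≤ r then
    if PySem.List.pyGetD t r 0 == PySem.List.pyGetD t l 0 then
      1 + layers t (l + 1) (r - 1)
    else 0
  else 0
termination_by (r - l + 1).toNat
decreasing_by omega

lemma layers_unfold (t : List Int) (l r : Int) :
    layers t l r = if l ≤ r ∧ (PySem.List.pyGetD t r 0 == PySem.List.pyGetD t l 0) = true
      then 1 + layers t (l + 1) (r - 1) else 0 := by
  rw [layers]
  split_ifs <;> tauto

lemma layers_nonneg (t : List Int) (l r : Int) : 0 ≤ layers t l r := by
  fun_induction layers <;> omega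

lemma zadPeel_eq (t : List Int) (l r cnt : Int) :
    zadPeel t l r cnt = (cnt + layers t l r, l + layers t l r, r - layers t l r) := by
  fun_induction zadPeel with
  | case1 l r cnt h hb ih =>
      rw [ih]
      conv_rhs => rw [layers_unfold, if_pos ⟨h, hb⟩]
      refine Prod.ext (by ring) (Prod.ext (by ring) (by ring))
  | case2 l r cnt h hb =>
      rw [layers_unfold]
      simp [h, hb]
  | case3 l r cnt h =>
      rw [layers_unfold]
      simp [h]

-- generic left-fold loop invariant over range(a, b)
lemma foldl_range_inv {σ : Type} (f : σ → Int → σ) (P : Int → σ → Prop) (a b : Int)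
    (hab : a ≤ b)
    (step : ∀ i s, a ≤ i → i < b → P i s → P (i + 1) (f s i)) :
    ∀ s, P a s → P b ((PySem.List.pyRange a b 1).foldl f s) := by
  have key : ∀ (k : Nat) (a : Int), a ≤ b → (b - a).toNat = k →
      (∀ i s, a ≤ i → i < b → P i s → P (i + 1) (f s i)) →
      ∀ s, P a s → P b ((PySem.List.pyRange a b 1).foldl f s) := by
    intro k
    induction k with
    | zero =>
        intro a hab hk _ s hs
        have hba : b ≤ a := by omega
        rw [PySem.List.pyRange_one_eq_nil hba]
        have : a = b := le_antisymm hab hba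
        simpa [this] using hs
    | succ k ih =>
        intro a hab hk hstep s hs
        have hlt : a < b := by omega
        rw [PySem.List.pyRange_one_cons hlt]
        simp only [List.foldl_cons]
        exact ih (a + 1) (by omega) (by omega)
          (fun i s hi hib => hstep i s (by omega) hib)
          (f s a) (hstep a s le_rfl hlt hs)
  exact key (b - a).toNat a hab rfl step

-- build invariant: after processing gaps < G, the table is `layers` on gaps < G, absent beyond
def BuildInv (t : List Int) (n G : Int) (g : PySem.Dict (Int × Int) Int) : Prop :=
  ∀ i j : Int, 0 ≤ i → j < n →
    g.getD (i, j) 0 = if j - i < G then layers t i j else 0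

lemma build_correct (t : List Int) (n : Int) (hn : 0 ≤ n) :
    ∀ i j : Int, 0 ≤ i → j < n → (zadAltBuild t n).getD (i, j) 0 = layers t i j := by
  have main : BuildInv t n n (zadAltBuild t n) := by
    unfold zadAltBuild
    refine foldl_range_inv _ (BuildInv t n) 0 n hn ?_ _ ?_
    · -- outer step: process gap G
      intro G g hG0 hGn hinv
      dsimp only
      have hQ := foldl_range_inv
        (fun g i =>
          if PySem.List.pyGetD t i 0 == PySem.List.pyGetD t (i + G) 0 then
            g.insert (i, i + G) (1 + g.getD (i + 1, i + G - 1) 0)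
          else g)
        (fun i0 g => ∀ i j : Int, 0 ≤ i → j < n →
          g.getD (i, j) 0 =
            if j - i < G ∨ (j - i = G ∧ i < i0) then layers t i j else 0)
        0 (n - G) (by omega) ?step g ?base
      · intro i j hi hj
        rw [hQ i j hi hj]
        refine if_congr ?_ rfl rfl
        constructor
        · rintro (h | ⟨h1, _⟩) <;> omega
        · intro h
          by_cases hc : j - i < G
          · exact Or.inl hc
          · exact Or.inr ⟨by omega, by omega⟩
      case step =>
        intro i0 g' hi0 hi0n hq
        dsimp only
        intro i j hi hj
        by_cases hmatch : (PySem.List.pyGetD t i0 0 == PySem.List.pyGetD t (i0 + G) 0) = true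
        · rw [if_pos hmatch, PySem.Dict.getD_insert]
          by_cases hkey : (i, j) = (i0, i0 + G)
          · rw [Prod.mk.injEq] at hkey
            obtain ⟨hi', hj'⟩ := hkey
            subst hi'
            subst hj'
            rw [if_pos rfl,
              if_pos (Or.inr ⟨by omega, by omega⟩),
              hq (i + 1) (i + G - 1) (by omega) (by omega),
              if_pos (Or.inl (by omega))]
            conv_rhs => rw [layers_unfold]
            have hb : (PySem.List.pyGetD t (i + G) 0 == PySem.List.pyGetD t i 0) = true := by
              simp only [beq_iff_eq] at hmatch ⊢
              rw [hmatch]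
            rw [if_pos ⟨by omega, hb⟩]
          · rw [if_neg hkey, hq i j hi hj]
            refine if_congr ?_ rfl rfl
            constructor
            · rintro (h | ⟨h1, h2⟩)
              · exact Or.inl h
              · exact Or.inr ⟨h1, by omega⟩
            · rintro (h | ⟨h1, h2⟩)
              · exact Or.inl h
              · rcases lt_or_eq_of_le (show i ≤ i0 by omega) with hlt | heq
                · exact Or.inr ⟨h1, hlt⟩
                · exact absurd (by rw [Prod.mk.injEq]; exact ⟨heq, by omega⟩) hkey
        · rw [if_neg hmatch, hq i j hi hj]
          by_cases hd : j - i < G ∨ (j - i = G ∧ i < i0)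
          · rw [if_pos hd, if_pos (hd.imp id (fun ⟨h1, h2⟩ => ⟨h1, by omega⟩))]
          · rw [if_neg hd]
            by_cases he : j - i < G ∨ (j - i = G ∧ i < i0 + 1)
            · rw [if_pos he]
              have h1 : j - i = G ∧ i = i0 := by
                rcases he with h | ⟨h1, h2⟩
                · exact absurd (Or.inl h) hd
                · have : ¬ i < i0 := fun hc => hd (Or.inr ⟨h1, hc⟩)
                  exact ⟨h1, by omega⟩
              rw [layers_unfold]
              have hb2 : ¬ (PySem.List.pyGetD t j 0 == PySem.List.pyGetD t i 0) = true := by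
                simp only [beq_iff_eq] at hmatch ⊢
                rw [h1.2, show j = i0 + G by omega]
                exact fun he2 => hmatch he2.symm
              rw [if_neg (fun hc => hb2 hc.2)]
            · rw [if_neg he]
      case base =>
        intro i j hi hj
        rw [hinv i j hi hj]
        refine if_congr ?_ rfl rfl
        constructor
        · exact Or.inl
        · rintro (h | ⟨_, h2⟩)
          · exact h
          · omega
    · -- base: the empty dict is 0 everywhere, and `layers` is 0 on j < i
      intro i j hi hj
      have h0 : (PySem.Dict.empty : PySem.Dict (Int × Int) Int).getD (i, j) 0 = 0 := by
        simp [PySem.Dict.getD, PySem.Dict.get?, PySem.Dict.empty]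
      rw [h0]
      by_cases hc : j - i < 0
      · rw [if_pos hc, layers_unfold, if_neg (fun hh => by omega : ¬ (i ≤ j ∧ _))]
      · rw [if_neg hc]
  intro i j hi hj
  rw [main i j hi hj, if_pos (by omega)]

-- the two inner loops agree when the table computes `layers`
lemma inner_eq (t : List Int) (n : Int) (g : PySem.Dict (Int × Int) Int)
    (hg : ∀ i j : Int, 0 ≤ i → j < n → g.getD (i, j) 0 = layers t i j) :
    ∀ (rs : List Int) (M l : Int), 0 ≤ l → (∀ r ∈ rs, 0 ≤ r ∧ r < n) →
      zadInner t M l rs = zadAltInner t g M l rs := by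
  intro rs
  induction rs with
  | nil => intro M l _ _; rfl
  | cons r rest ih =>
    intro M l hl hrs
    obtain ⟨hr0, hrn⟩ := hrs r (List.mem_cons_self ..)
    simp only [zadInner, zadAltInner]
    by_cases hbr : r - l + 1 < M
    · simp [hbr]
    · simp only [hbr, if_false]
      by_cases hm : (PySem.List.pyGetD t l 0 == PySem.List.pyGetD t r 0) = true
      · rw [if_pos hm, if_pos hm]
        rw [zadPeel_eq, hg (l + 1) (r - 1) (by omega) (by omega)]
        dsimp only
        have hnn := layers_nonneg t (l + 1) (r - 1)
        have e1 : (1 : Int) + layers t (l + 1) (r - 1)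
            = layers t (l + 1) (r - 1) + 1 := by ring
        rw [e1, show l + (layers t (l + 1) (r - 1) + 1)
            = l + 1 + layers t (l + 1) (r - 1) from by ring]
        exact ih _ _ (by omega) (fun r' hr' => hrs r' (List.mem_cons_of_mem _ hr'))
      · rw [if_neg hm, if_neg hm]
        exact ih M l hl (fun r' hr' => hrs r' (List.mem_cons_of_mem _ hr'))

lemma outer_eq (t : List Int) (n : Int) (g : PySem.Dict (Int × Int) Int)
    (hg : ∀ i j : Int, 0 ≤ i → j < n → g.getD (i, j) 0 = layers t i j) :
    ∀ (ls : List Int) (M : Int), (∀ L ∈ ls, 0 ≤ L) →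
      zadOuter t n M ls = zadAltOuter t g n M ls := by
  intro ls
  induction ls with
  | nil => intro M _; rfl
  | cons L rest ih =>
    intro M hls
    simp only [zadOuter, zadAltOuter]
    by_cases hbr : n - L + 1 < M
    · simp [hbr]
    · simp only [hbr, if_false]
      rw [inner_eq t n g hg _ M L (hls L (List.mem_cons_self ..))
        (fun r hr => by
          rw [PySem.List.mem_pyRange_neg_one] at hr
          exact ⟨by omega, by omega⟩)]
      exact ih _ (fun L' hL' => hls L' (List.mem_cons_of_mem _ hL'))

-- ===== VERDICT (by name: the statement is the Claim_ definition above) =====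
theorem zad_spec : Claim_equal_zad := by
  intro t _
  unfold Spec_zad zad zad_alt
  exact outer_eq t (t.length : Int) (zadAltBuild t (t.length : Int))
    (build_correct t (t.length : Int) (by positivity)) _ 0
    (fun L hL => by rw [PySem.List.mem_pyRange_one] at hL; omega)
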